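-- pv_equiv track=rewrite | github.com/pregenie/ark-tools | src/ark_tools/mams_core/mams_006_migration_planning_engine.py | _group_similar_services
-- ===== SOURCE A (Python) =====
-- from typing import Any, Dict, List, Optional, Tuple
--
-- def _group_similar_services(services: List[Dict]) -> Dict[str, List[Dict]]:
--     """Group services by similarity patterns"""
--     groups = {
--         "authentication_services": [],
--         "data_services": [],
--         "ui_services": [],
--         "integration_services": [],
--         "utility_services": []
--     }
--
--     for service in services:
--         service_name = service.get('service_name', '').lower()
--
--         if any(pattern in service_name for pattern in ['auth', 'login', 'security', 'permission']):
--             groups["authentication_services"].append(service)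
--         elif any(pattern in service_name for pattern in ['data', 'repository', 'database', 'storage']):
--             groups["data_services"].append(service)
--         elif any(pattern in service_name for pattern in ['ui', 'component', 'render', 'view']):
--             groups["ui_services"].append(service)
--         elif any(pattern in service_name for pattern in ['integration', 'api', 'webhook', 'client']):
--             groups["integration_services"].append(service)
--         else:
--             groups["utility_services"].append(service)
--
--     return {k: v for k, v in groups.items() if v}  # Remove empty groups
-- ===== SOURCE B (Python) =====
-- from typing import Dict, List
--
-- def _group_similar_services(services: List[Dict]) -> Dict[str, List[Dict]]:
--     """Group services by staged partition passes: peel each category off the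
--     remaining pool in priority order, then the leftovers are utilities."""
--     table = [
--         ("authentication_services", ("auth", "login", "security", "permission")),
--         ("data_services", ("data", "repository", "database", "storage")),
--         ("ui_services", ("ui", "component", "render", "view")),
--         ("integration_services", ("integration", "api", "webhook", "client")),
--     ]
--     result = {}
--     remaining = [(s.get('service_name', '').lower(), s) for s in services]
--     for category, patterns in table:
--         matched = [(n, s) for n, s in remaining if any(p in n for p in patterns)]
--         if matched:
--             result[category] = [s for _, s in matched]
--         remaining = [(n, s) for n, s in remaining if not any(p in n for p in patterns)]
--     if remaining:
--         result["utility_services"] = [s for _, s in remaining]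
--     return result
-- ===== Notes on version B (the rewrite author's own statement) =====
-- stated objective: alternative
-- what changed: Instead of one pass over the services classifying each through the if/elif chain into pre-made buckets, B makes staged passes over the data: for each category in priority order it partitions the remaining pool into matched and unmatched services, records the matched group if nonempty, and the final leftovers become utility_services.
import Mathlib
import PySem

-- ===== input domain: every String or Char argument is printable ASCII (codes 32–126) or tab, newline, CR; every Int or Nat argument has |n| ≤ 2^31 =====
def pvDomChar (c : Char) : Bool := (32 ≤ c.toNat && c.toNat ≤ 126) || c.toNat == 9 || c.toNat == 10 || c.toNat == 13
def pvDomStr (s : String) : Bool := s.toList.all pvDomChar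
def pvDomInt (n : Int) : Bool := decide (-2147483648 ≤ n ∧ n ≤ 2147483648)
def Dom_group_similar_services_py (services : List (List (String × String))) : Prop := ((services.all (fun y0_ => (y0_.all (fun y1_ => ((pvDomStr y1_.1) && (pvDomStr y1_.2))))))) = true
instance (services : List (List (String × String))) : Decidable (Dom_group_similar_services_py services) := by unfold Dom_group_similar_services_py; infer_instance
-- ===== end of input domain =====

-- B replaces A's single classification pass (if/elif chain into pre-made buckets) by
-- staged partition passes: each category peels its matches off the remaining pool in
-- priority order, leftovers become utilities; same output on every input (alternative).


-- ===== PORT A =====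
-- loop body of A's for-loop: the if/elif chain appending to the matching group
def pvStepA (g : PySem.Dict String (List (List (String × String))))
    (service : List (String × String)) : PySem.Dict String (List (List (String × String))) :=
  let service_name := PySem.Str.lower (PySem.Dict.getD (PySem.Dict.mk service) "service_name" "")
  if ["auth", "login", "security", "permission"].any (fun p => PySem.Str.isIn p service_name) then
    g.modify "authentication_services" [] (· ++ [service])
  else if ["data", "repository", "database", "storage"].any (fun p => PySem.Str.isIn p service_name) then
    g.modify "data_services" [] (· ++ [service])
  else if ["ui", "component", "render", "view"].any (fun p => PySem.Str.isIn p service_name) then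
    g.modify "ui_services" [] (· ++ [service])
  else if ["integration", "api", "webhook", "client"].any (fun p => PySem.Str.isIn p service_name) then
    g.modify "integration_services" [] (· ++ [service])
  else
    g.modify "utility_services" [] (· ++ [service])

def group_similar_services_py (services : List (List (String × String))) : List (String × List (List (String × String))) :=
  let groups : PySem.Dict String (List (List (String × String))) :=
    PySem.Dict.mk [("authentication_services", []), ("data_services", []),
                   ("ui_services", []), ("integration_services", []), ("utility_services", [])]
  let groups := services.foldl pvStepA groups
  -- {k: v for k, v in groups.items() if v}
  (groups.items.filter (fun kv => !kv.2.isEmpty))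

-- ===== PORT B =====
-- B's ordered (category, patterns) table
def pvTable : List (String × List String) :=
  [("authentication_services", ["auth", "login", "security", "permission"]),
   ("data_services", ["data", "repository", "database", "storage"]),
   ("ui_services", ["ui", "component", "render", "view"]),
   ("integration_services", ["integration", "api", "webhook", "client"])]

-- one stage of B: partition the remaining pool by this category's patterns,
-- record the matched group if nonempty (result[category] = …: fresh key, so append)
def pvStageB (st : List (String × List (List (String × String))) × List (String × List (String × String)))
    (row : String × List String) :
    List (String × List (List (String × String))) × List (String × List (String × String)) :=
  let matched := st.2.filter (fun ns => row.2.any (fun p => PySem.Str.isIn p ns.1))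
  let result := if matched.isEmpty then st.1 else st.1 ++ [(row.1, matched.map (fun ns => ns.2))]
  let remaining := st.2.filter (fun ns => !(row.2.any (fun p => PySem.Str.isIn p ns.1)))
  (result, remaining)

def group_similar_services_py_alt (services : List (List (String × String))) : List (String × List (List (String × String))) :=
  let remaining := services.map (fun s => (PySem.Str.lower (PySem.Dict.getD (PySem.Dict.mk s) "service_name" ""), s))
  let st := pvTable.foldl pvStageB ([], remaining)
  if st.2.isEmpty then st.1 else st.1 ++ [("utility_services", st.2.map (fun ns => ns.2))]

-- ===== PRECONDITION & SPEC =====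
def Spec_group_similar_services_py (services : List (List (String × String))) (out : List (String × List (List (String × String)))) : Prop := out = group_similar_services_py_alt services
instance (services : List (List (String × String))) (out : List (String × List (List (String × String)))) : Decidable (Spec_group_similar_services_py services out) := by unfold Spec_group_similar_services_py; infer_instance

-- ===== CLAIM (what is proved, stated in full; the proofs are below) =====
def Claim_equal_group_similar_services_py : Prop := ∀ (services : List (List (String × String))), Dom_group_similar_services_py services → Spec_group_similar_services_py services (group_similar_services_py services)

-- ===== LEMMAS AND PROOFS =====
def pvNm (s : List (String × String)) : String :=
  PySem.Str.lower (PySem.Dict.getD (PySem.Dict.mk s) "service_name" "")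
def pvM1 (s : List (String × String)) : Bool := ["auth", "login", "security", "permission"].any (fun p => PySem.Str.isIn p (pvNm s))
def pvM2 (s : List (String × String)) : Bool := ["data", "repository", "database", "storage"].any (fun p => PySem.Str.isIn p (pvNm s))
def pvM3 (s : List (String × String)) : Bool := ["ui", "component", "render", "view"].any (fun p => PySem.Str.isIn p (pvNm s))
def pvM4 (s : List (String × String)) : Bool := ["integration", "api", "webhook", "client"].any (fun p => PySem.Str.isIn p (pvNm s))

def pvP1 (s : List (String × String)) : Bool := pvM1 s
def pvP2 (s : List (String × String)) : Bool := pvM2 s && !pvM1 s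
def pvP3 (s : List (String × String)) : Bool := pvM3 s && (!pvM2 s && !pvM1 s)
def pvP4 (s : List (String × String)) : Bool := pvM4 s && (!pvM3 s && (!pvM2 s && !pvM1 s))
def pvP5 (s : List (String × String)) : Bool := !pvM4 s && (!pvM3 s && (!pvM2 s && !pvM1 s))

def pvCanon (a b c d e : List (List (String × String))) : PySem.Dict String (List (List (String × String))) :=
  PySem.Dict.mk [("authentication_services", a), ("data_services", b),
                 ("ui_services", c), ("integration_services", d), ("utility_services", e)]

theorem pvStepA_canon (a b c d e : List (List (String × String))) (s : List (String × String)) :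
    pvStepA (pvCanon a b c d e) s =
      if pvP1 s then pvCanon (a ++ [s]) b c d e
      else if pvP2 s then pvCanon a (b ++ [s]) c d e
      else if pvP3 s then pvCanon a b (c ++ [s]) d e
      else if pvP4 s then pvCanon a b c (d ++ [s]) e
      else pvCanon a b c d (e ++ [s]) := by
  have hA : pvStepA (pvCanon a b c d e) s =
      (if pvM1 s then (pvCanon a b c d e).modify "authentication_services" [] (· ++ [s])
       else if pvM2 s then (pvCanon a b c d e).modify "data_services" [] (· ++ [s])
       else if pvM3 s then (pvCanon a b c d e).modify "ui_services" [] (· ++ [s])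
       else if pvM4 s then (pvCanon a b c d e).modify "integration_services" [] (· ++ [s])
       else (pvCanon a b c d e).modify "utility_services" [] (· ++ [s])) := rfl
  rw [hA]
  by_cases h1 : pvM1 s
  · rw [if_pos h1, if_pos (show pvP1 s = true from h1)]; rfl
  · rw [if_neg h1, if_neg (show ¬ pvP1 s = true from h1)]
    by_cases h2 : pvM2 s
    · rw [if_pos h2, if_pos (show pvP2 s = true by simp [pvP2, h1, h2])]; rfl
    · rw [if_neg h2, if_neg (show ¬ pvP2 s = true by simp [pvP2, h2])]
      by_cases h3 : pvM3 s
      · rw [if_pos h3, if_pos (show pvP3 s = true by simp [pvP3, h1, h2, h3])]; rfl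
      · rw [if_neg h3, if_neg (show ¬ pvP3 s = true by simp [pvP3, h3])]
        by_cases h4 : pvM4 s
        · rw [if_pos h4, if_pos (show pvP4 s = true by simp [pvP4, h1, h2, h3, h4])]; rfl
        · rw [if_neg h4, if_neg (show ¬ pvP4 s = true by simp [pvP4, h4])]; rfl

theorem pvFoldA_canon (l : List (List (String × String))) :
    ∀ a b c d e, l.foldl pvStepA (pvCanon a b c d e) =
      pvCanon (a ++ l.filter pvP1) (b ++ l.filter pvP2) (c ++ l.filter pvP3)
              (d ++ l.filter pvP4) (e ++ l.filter pvP5) := by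
  induction l with
  | nil => intro a b c d e; simp
  | cons s t ih =>
    intro a b c d e
    rw [List.foldl_cons, pvStepA_canon]
    by_cases h1 : pvM1 s
    · have p1 : pvP1 s = true := h1
      have p2 : pvP2 s = false := by simp [pvP2, h1]
      have p3 : pvP3 s = false := by simp [pvP3, h1]
      have p4 : pvP4 s = false := by simp [pvP4, h1]
      have p5 : pvP5 s = false := by simp [pvP5, h1]
      rw [if_pos p1, ih]
      simp [p1, p2, p3, p4, p5]
    · rw [if_neg (show ¬ pvP1 s = true from h1)]
      by_cases h2 : pvM2 s
      · have p1 : pvP1 s = false := by simpa using h1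
        have p2 : pvP2 s = true := by simp [pvP2, h1, h2]
        have p3 : pvP3 s = false := by simp [pvP3, h2]
        have p4 : pvP4 s = false := by simp [pvP4, h2]
        have p5 : pvP5 s = false := by simp [pvP5, h2]
        rw [if_pos p2, ih]
        simp [p1, p2, p3, p4, p5]
      · rw [if_neg (show ¬ pvP2 s = true by simp [pvP2, h2])]
        by_cases h3 : pvM3 s
        · have p1 : pvP1 s = false := by simpa using h1
          have p2 : pvP2 s = false := by simp [pvP2, h2]
          have p3 : pvP3 s = true := by simp [pvP3, h1, h2, h3]
          have p4 : pvP4 s = false := by simp [pvP4, h3]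
          have p5 : pvP5 s = false := by simp [pvP5, h3]
          rw [if_pos p3, ih]
          simp [p1, p2, p3, p4, p5]
        · rw [if_neg (show ¬ pvP3 s = true by simp [pvP3, h3])]
          by_cases h4 : pvM4 s
          · have p1 : pvP1 s = false := by simpa using h1
            have p2 : pvP2 s = false := by simp [pvP2, h2]
            have p3 : pvP3 s = false := by simp [pvP3, h3]
            have p4 : pvP4 s = true := by simp [pvP4, h1, h2, h3, h4]
            have p5 : pvP5 s = false := by simp [pvP5, h4]
            rw [if_pos p4, ih]
            simp [p1, p2, p3, p4, p5]
          · have p1 : pvP1 s = false := by simpa using h1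
            have p2 : pvP2 s = false := by simp [pvP2, h2]
            have p3 : pvP3 s = false := by simp [pvP3, h3]
            have p4 : pvP4 s = false := by simp [pvP4, h4]
            have p5 : pvP5 s = true := by simp [pvP5, h1, h2, h3, h4]
            rw [if_neg (show ¬ pvP4 s = true by simp [pvP4, h4]), ih]
            simp [p1, p2, p3, p4, p5]

theorem pvA_char (l : List (List (String × String))) :
    group_similar_services_py l =
      ([("authentication_services", l.filter pvP1), ("data_services", l.filter pvP2),
        ("ui_services", l.filter pvP3), ("integration_services", l.filter pvP4),
        ("utility_services", l.filter pvP5)]).filter (fun kv => !kv.2.isEmpty) := by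
  show ((l.foldl pvStepA (pvCanon [] [] [] [] [])).items.filter (fun kv => !kv.2.isEmpty)) = _
  rw [pvFoldA_canon]
  rfl

theorem pvFilterMapPair (q : (String × List (String × String)) → Bool) (l : List (List (String × String))) :
    List.filter q (List.map (fun s => (PySem.Str.lower (PySem.Dict.getD (PySem.Dict.mk s) "service_name" ""), s)) l)
      = List.map (fun s => (PySem.Str.lower (PySem.Dict.getD (PySem.Dict.mk s) "service_name" ""), s))
          (List.filter (fun s => q (PySem.Str.lower (PySem.Dict.getD (PySem.Dict.mk s) "service_name" ""), s)) l) := by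
  induction l with
  | nil => rfl
  | cons x t ih => simp only [List.map_cons, List.filter_cons]; split <;> simp [ih]

theorem pvPhi1 : (fun s => ["auth", "login", "security", "permission"].any fun p => PySem.Str.isIn p (PySem.Str.lower (PySem.Dict.getD (PySem.Dict.mk s) "service_name" ""))) = pvP1 := rfl
theorem pvPhi2 : (fun a => (["data", "repository", "database", "storage"].any fun p => PySem.Str.isIn p (PySem.Str.lower (PySem.Dict.getD (PySem.Dict.mk a) "service_name" ""))) && !(["auth", "login", "security", "permission"].any fun p => PySem.Str.isIn p (PySem.Str.lower (PySem.Dict.getD (PySem.Dict.mk a) "service_name" "")))) = pvP2 := rfl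
theorem pvPhi3 : (fun a => (["ui", "component", "render", "view"].any fun p => PySem.Str.isIn p (PySem.Str.lower (PySem.Dict.getD (PySem.Dict.mk a) "service_name" ""))) && ((!(["data", "repository", "database", "storage"].any fun p => PySem.Str.isIn p (PySem.Str.lower (PySem.Dict.getD (PySem.Dict.mk a) "service_name" "")))) && !(["auth", "login", "security", "permission"].any fun p => PySem.Str.isIn p (PySem.Str.lower (PySem.Dict.getD (PySem.Dict.mk a) "service_name" ""))))) = pvP3 := rfl
theorem pvPhi4 : (fun a => (["integration", "api", "webhook", "client"].any fun p => PySem.Str.isIn p (PySem.Str.lower (PySem.Dict.getD (PySem.Dict.mk a) "service_name" ""))) && ((!(["ui", "component", "render", "view"].any fun p => PySem.Str.isIn p (PySem.Str.lower (PySem.Dict.getD (PySem.Dict.mk a) "service_name" "")))) && ((!(["data", "repository", "database", "storage"].any fun p => PySem.Str.isIn p (PySem.Str.lower (PySem.Dict.getD (PySem.Dict.mk a) "service_name" "")))) && !(["auth", "login", "security", "permission"].any fun p => PySem.Str.isIn p (PySem.Str.lower (PySem.Dict.getD (PySem.Dict.mk a) "service_name" "")))))) = pvP4 := rfl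
theorem pvPhi5 : (fun a => (!(["integration", "api", "webhook", "client"].any fun p => PySem.Str.isIn p (PySem.Str.lower (PySem.Dict.getD (PySem.Dict.mk a) "service_name" "")))) && ((!(["ui", "component", "render", "view"].any fun p => PySem.Str.isIn p (PySem.Str.lower (PySem.Dict.getD (PySem.Dict.mk a) "service_name" "")))) && ((!(["data", "repository", "database", "storage"].any fun p => PySem.Str.isIn p (PySem.Str.lower (PySem.Dict.getD (PySem.Dict.mk a) "service_name" "")))) && !(["auth", "login", "security", "permission"].any fun p => PySem.Str.isIn p (PySem.Str.lower (PySem.Dict.getD (PySem.Dict.mk a) "service_name" "")))))) = pvP5 := rfl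

theorem pvB_char (l : List (List (String × String))) :
    group_similar_services_py_alt l =
      ([("authentication_services", l.filter pvP1), ("data_services", l.filter pvP2),
        ("ui_services", l.filter pvP3), ("integration_services", l.filter pvP4),
        ("utility_services", l.filter pvP5)]).filter (fun kv => !kv.2.isEmpty) := by
  unfold group_similar_services_py_alt pvTable
  simp only [List.foldl_cons, List.foldl_nil, pvStageB]
  simp only [pvFilterMapPair, List.filter_filter, List.map_map, List.isEmpty_map,
             Function.comp_def, List.map_id']
  simp only [pvPhi1, pvPhi2, pvPhi3, pvPhi4, pvPhi5]
  by_cases e1 : (l.filter pvP1).isEmpty <;> by_cases e2 : (l.filter pvP2).isEmpty <;>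
    by_cases e3 : (l.filter pvP3).isEmpty <;> by_cases e4 : (l.filter pvP4).isEmpty <;>
      by_cases e5 : (l.filter pvP5).isEmpty <;>
        simp [e1, e2, e3, e4, e5]

-- ===== VERDICT (by name: the statement is the Claim_ definition above) =====
theorem group_similar_services_py_spec : Claim_equal_group_similar_services_py := by
  intro services _
  unfold Spec_group_similar_services_py
  rw [pvA_char, pvB_char]
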